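-- pv_equiv track=rewrite | github.com/orban/moirai | scripts/experiment_predictive_model.py | has_test_fail_loop
-- ===== SOURCE A (Python) =====
-- def has_test_fail_loop(names: list[str], threshold: int = 3) -> bool:
--     """True if there are `threshold`+ consecutive test(fail) without an edit/write."""
--     consecutive_fails = 0
--     for name in names:
--         if name == "test(fail)":
--             consecutive_fails += 1
--             if consecutive_fails >= threshold:
--                 return True
--         elif name in ("edit", "write", "edit(source)", "edit(test_file)",
--                       "edit(config)", "edit(other)", "write(source)",
--                       "write(test_file)", "write(config)", "write(other)"):
--             consecutive_fails = 0
--         # other steps don't reset the counter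
--     return False
-- ===== SOURCE B (Python) =====
-- RESET_TOKENS = {
--     "edit", "write", "edit(source)", "edit(test_file)",
--     "edit(config)", "edit(other)", "write(source)",
--     "write(test_file)", "write(config)", "write(other)",
-- }
--
--
-- def has_test_fail_loop(names: list[str], threshold: int = 3) -> bool:
--     """True if there are `threshold`+ consecutive test(fail) without an edit/write."""
--     # prefix[i] = number of "test(fail)" tokens among names[:i]
--     prefix = [0]
--     total = 0
--     for name in names:
--         total += (name == "test(fail)")
--         prefix.append(total)
--     # seg_start[i] = index of the first token of the segment containing position i
--     # (segments are delimited by the edit/write tokens)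
--     seg_start = []
--     start = 0
--     for i, name in enumerate(names):
--         seg_start.append(start)
--         if name in RESET_TOKENS:
--             start = i + 1
--     # a fail at position i closes a loop iff its segment holds >= threshold fails up to i
--     return any(name == "test(fail)" and prefix[i + 1] - prefix[start] >= threshold
--                for i, (name, start) in enumerate(zip(names, seg_start)))
-- ===== Notes on version B (the rewrite author's own statement) =====
-- stated objective: alternative
-- what changed: Replaces A's streaming consecutive-fail counter (with early return) by staged arrays: a prefix-sum array of fail counts and a per-position segment-start index array, then an existence check over fail positions comparing prefix[i+1]-prefix[seg_start[i]] to the threshold.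
import Mathlib
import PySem

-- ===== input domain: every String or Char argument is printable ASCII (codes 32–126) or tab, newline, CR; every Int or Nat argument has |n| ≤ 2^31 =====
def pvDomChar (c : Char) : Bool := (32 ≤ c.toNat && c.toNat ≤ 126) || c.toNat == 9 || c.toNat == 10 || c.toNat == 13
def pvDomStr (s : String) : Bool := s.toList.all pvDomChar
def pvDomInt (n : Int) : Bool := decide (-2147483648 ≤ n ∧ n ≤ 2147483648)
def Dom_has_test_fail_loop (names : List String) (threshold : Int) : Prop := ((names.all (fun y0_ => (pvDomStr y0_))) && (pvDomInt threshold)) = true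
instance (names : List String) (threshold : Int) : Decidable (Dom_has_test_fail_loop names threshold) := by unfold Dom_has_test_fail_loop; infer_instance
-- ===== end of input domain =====

-- B replaces A's streaming reset-counter by staged arrays: a pfx count of fails, a
-- segment-start index per position, then an existence check over fail positions
-- (objective: alternative, same O(n) cost).

-- ===== PORT A =====
-- A's loop: a counter of consecutive fails, reset on edit/write tokens, early return True
def hasFailLoopA : List String → Int → Int → Bool
  | [], _, _ => false
  | name :: rest, threshold, c =>
    if name = "test(fail)" then
      if c + 1 ≥ threshold then true else hasFailLoopA rest threshold (c + 1)
    else if name ∈ (["edit", "write", "edit(source)", "edit(test_file)",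
                     "edit(config)", "edit(other)", "write(source)",
                     "write(test_file)", "write(config)", "write(other)"] : List String) then
      hasFailLoopA rest threshold 0
    else
      hasFailLoopA rest threshold c

def has_test_fail_loop (names : List String) (threshold : Int) : Bool :=
  hasFailLoopA names threshold 0

-- ===== PORT B =====
def resetTokensB : List String :=
  ["edit", "write", "edit(source)", "edit(test_file)",
   "edit(config)", "edit(other)", "write(source)",
   "write(test_file)", "write(config)", "write(other)"]

-- first loop of Source B: prefix fail counts (running total appended per token; prefix = 0 :: this)
def prefixAuxB : List String → Int → List Int
  | [], _ => []
  | name :: rest, total =>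
    let t := total + (if name = "test(fail)" then 1 else 0)
    t :: prefixAuxB rest t

-- second loop of Source B: seg_start[i] = start index of the segment containing position i
def segStartAuxB : List String → Nat → Nat → List Nat
  | [], _, _ => []
  | name :: rest, i, start =>
    start :: segStartAuxB rest (i + 1) (if name ∈ resetTokensB then i + 1 else start)

def has_test_fail_loop_alt (names : List String) (threshold : Int) : Bool :=
  let pfx := (0 : Int) :: prefixAuxB names 0
  let segStart := segStartAuxB names 0 0
  ((names.zip segStart).zipIdx).any (fun p =>
    decide (p.1.1 = "test(fail)") &&
    decide (pfx.getD (p.2 + 1) 0 - pfx.getD p.1.2 0 ≥ threshold))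

-- ===== PRECONDITION & SPEC =====
def Spec_has_test_fail_loop (names : List String) (threshold : Int) (out : Bool) : Prop := out = has_test_fail_loop_alt names threshold
instance (names : List String) (threshold : Int) (out : Bool) : Decidable (Spec_has_test_fail_loop names threshold out) := by unfold Spec_has_test_fail_loop; infer_instance

-- ===== CLAIM (what is proved, stated in full; the proofs are below) =====
def Claim_equal_has_test_fail_loop : Prop := ∀ (names : List String) (threshold : Int), Dom_has_test_fail_loop names threshold → Spec_has_test_fail_loop names threshold (has_test_fail_loop names threshold)

-- ===== LEMMAS AND PROOFS =====

-- number of "test(fail)" tokens, as an Int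
def fcP : List String → Int
  | [] => 0
  | name :: rest => (if name = "test(fail)" then 1 else 0) + fcP rest

-- prefixAuxB entries are running fail totals
lemma prefixAuxB_getD (l : List String) (t : Int) (j : Nat) (hj : j < l.length) :
    (prefixAuxB l t).getD j 0 = t + fcP (l.take (j + 1)) := by
  induction l generalizing t j with
  | nil => simp at hj
  | cons name rest ih =>
    cases j with
    | zero => simp [prefixAuxB, fcP]
    | succ j =>
      simp only [prefixAuxB, List.getD_cons_succ, List.take_succ_cons, fcP]
      rw [ih _ j (by simpa using hj)]
      ring

-- MAIN: the any over the zipped arrays, with consistent state, equals A's streaming loop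
lemma main_lemma (rest : List String) (threshold : Int) :
    ∀ (i0 s0 : Nat) (t0 c : Int) (pfx : List Int),
    (∀ j, j ≤ rest.length → pfx.getD (i0 + j) 0 = t0 + fcP (rest.take j)) →
    pfx.getD s0 0 = t0 - c →
    ((rest.zip (segStartAuxB rest i0 s0)).zipIdx i0).any (fun p =>
        decide (p.1.1 = "test(fail)") &&
        decide (pfx.getD (p.2 + 1) 0 - pfx.getD p.1.2 0 ≥ threshold))
      = hasFailLoopA rest threshold c := by
  induction rest with
  | nil => intro _ _ _ _ _ _ _; simp [segStartAuxB, hasFailLoopA]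
  | cons name rs ih =>
    intro i0 s0 t0 c pfx hp hs
    simp only [segStartAuxB, List.zip_cons_cons, List.zipIdx_cons, List.any_cons]
    have hp1 : pfx.getD (i0 + 1) 0 = t0 + (if name = "test(fail)" then 1 else 0) := by
      have := hp 1 (by simp)
      simpa [fcP] using this
    by_cases hf : name = "test(fail)"
    · -- fail token
      have hfr : name ∉ resetTokensB := by subst hf; decide
      have head : (decide (name = "test(fail)") &&
          decide (pfx.getD (i0 + 1) 0 - pfx.getD s0 0 ≥ threshold))
          = decide (c + 1 ≥ threshold) := by
        rw [hp1, hs]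
        simp [hf]
        constructor <;> intro h <;> omega
      rw [head]
      have tail : ((rs.zip (segStartAuxB rs (i0 + 1) (if name ∈ resetTokensB then i0 + 1 else s0))).zipIdx (i0 + 1)).any
          (fun p => decide (p.1.1 = "test(fail)") &&
            decide (pfx.getD (p.2 + 1) 0 - pfx.getD p.1.2 0 ≥ threshold))
          = hasFailLoopA rs threshold (c + 1) := by
        rw [if_neg hfr]
        apply ih (i0 + 1) s0 (t0 + 1) (c + 1) pfx
        · intro j hj
          have := hp (j + 1) (by simpa using Nat.succ_le_succ hj)
          simp only [List.take_succ_cons, fcP, hf] at this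
          rw [show i0 + 1 + j = i0 + (j + 1) by omega, this]
          simp
          ring
        · rw [hs]; ring
      rw [tail]
      simp only [hasFailLoopA, if_pos hf]
      by_cases hth : c + 1 ≥ threshold
      · simp [hth]
      · simp [hth]
    · -- not a fail token
      have head : (decide (name = "test(fail)") &&
          decide (pfx.getD (i0 + 1) 0 - pfx.getD s0 0 ≥ threshold)) = false := by
        simp [hf]
      rw [head, Bool.false_or]
      have hp' : ∀ j, j ≤ rs.length →
          pfx.getD (i0 + 1 + j) 0 = t0 + fcP (rs.take j) := by
        intro j hj
        have := hp (j + 1) (by simpa using Nat.succ_le_succ hj)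
        simp only [List.take_succ_cons, fcP, if_neg hf] at this
        rw [show i0 + 1 + j = i0 + (j + 1) by omega, this]
        ring
      by_cases hr : name ∈ resetTokensB
      · rw [if_pos hr]
        rw [ih (i0 + 1) (i0 + 1) t0 0 pfx hp' (by
          have := hp 1 (by simp)
          simpa [fcP, if_neg hf] using this)]
        simp only [hasFailLoopA, if_neg hf]
        rw [if_pos (by simpa [resetTokensB] using hr)]
      · rw [if_neg hr]
        rw [ih (i0 + 1) s0 t0 c pfx hp' hs]
        simp only [hasFailLoopA, if_neg hf]
        rw [if_neg (by simpa [resetTokensB] using hr)]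

theorem claim_aux (names : List String) (threshold : Int) :
    has_test_fail_loop names threshold = has_test_fail_loop_alt names threshold := by
  unfold has_test_fail_loop has_test_fail_loop_alt
  rw [main_lemma names threshold 0 0 0 0 ((0 : Int) :: prefixAuxB names 0)]
  · intro j hj
    cases j with
    | zero => simp [fcP]
    | succ j =>
      simp only [Nat.zero_add, List.getD_cons_succ]
      exact prefixAuxB_getD names 0 j (by omega)
  · simp

-- ===== VERDICT (by name: the statement is the Claim_ definition above) =====
theorem has_test_fail_loop_spec : Claim_equal_has_test_fail_loop := by
  intro names threshold _
  unfold Spec_has_test_fail_loop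
  exact (claim_aux names threshold)
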